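-- pv_equiv track=rewrite | github.com/Emilot/trenk-hours-app | utils/spreadsheet_utils.py | get_column_from_day
-- ===== SOURCE A (Python) =====
-- def get_column_from_day(day_of_month):
--     """
--     Επιστρέφει τη στήλη Excel που αντιστοιχεί σε μια ημέρα του μήνα,
--     ξεκινώντας από τη στήλη 'H' για την 1η ημέρα.
--     """
--     if not (1 <= day_of_month <= 31):
--         raise ValueError("Η ημέρα πρέπει να είναι μεταξύ 1 και 31")
--
--     start_index = ord("H") - ord("A")  # 7 (0-based)
--     column_index = start_index + (day_of_month - 1)
--
--     def index_to_excel_column(index):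
--         letters = ""
--         while index >= 0:
--             letters = chr(index % 26 + 65) + letters
--             index = index // 26 - 1
--         return letters
--
--     return index_to_excel_column(column_index)
-- ===== SOURCE B (Python) =====
-- def get_column_from_day(day_of_month):
--     if not (1 <= day_of_month <= 31):
--         raise ValueError("Η ημέρα πρέπει να είναι μεταξύ 1 και 31")
--     column_index = 7 + (day_of_month - 1)
--     if column_index < 26:
--         return chr(65 + column_index)
--     return "A" + chr(65 + column_index - 26)
-- ===== Notes on version B (the rewrite author's own statement) =====
-- stated objective: simpler
-- what changed: Replaces the inner index_to_excel_column helper and its base-26 digit-peeling while loop with a closed-form two-case computation (one letter below index 26, 'A'+letter otherwise), valid because 1<=day<=31 caps the column index at 37.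
import Mathlib
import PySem

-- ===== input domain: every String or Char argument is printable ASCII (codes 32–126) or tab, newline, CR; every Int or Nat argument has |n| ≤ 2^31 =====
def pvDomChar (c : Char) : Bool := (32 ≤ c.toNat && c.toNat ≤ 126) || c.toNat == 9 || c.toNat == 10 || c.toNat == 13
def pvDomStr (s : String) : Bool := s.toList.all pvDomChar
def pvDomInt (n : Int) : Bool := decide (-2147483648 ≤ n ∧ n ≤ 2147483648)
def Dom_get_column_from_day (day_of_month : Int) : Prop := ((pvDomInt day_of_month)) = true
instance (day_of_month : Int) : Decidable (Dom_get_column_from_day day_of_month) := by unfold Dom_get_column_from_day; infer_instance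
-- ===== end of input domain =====

-- B replaces the iterative base-26 digit-peeling helper with a closed-form two-case
-- computation (valid since 1 ≤ day ≤ 31 caps the index at 37): simpler, no loop.


-- ===== PORT A =====
-- the inner while loop of index_to_excel_column, with 'letters' as accumulator
def indexToExcelColumnLoop (index : Int) (letters : String) : String :=
  if _h : index ≥ 0 then
    indexToExcelColumnLoop (PySem.Int.floordiv index 26 - 1)
      (String.ofList [Char.ofNat (PySem.Int.mod index 26 + 65).toNat] ++ letters)
  else letters
termination_by (index + 1).toNat
decreasing_by
  have h26 : PySem.Int.floordiv index 26 = index / 26 :=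
    PySem.Int.floordiv_eq_ediv_of_pos (by norm_num)
  rw [h26]; omega

def index_to_excel_column (index : Int) : String :=
  indexToExcelColumnLoop index ""

def get_column_from_day (day_of_month : Int) : String :=
  -- the ValueError branch is excluded by Pre_get_column_from_day
  let start_index : Int := 7
  let column_index := start_index + (day_of_month - 1)
  index_to_excel_column column_index

-- ===== PORT B =====
def get_column_from_day_alt (day_of_month : Int) : String :=
  let column_index := 7 + (day_of_month - 1)
  if column_index < 26 then String.ofList [Char.ofNat (65 + column_index).toNat]
  else "A" ++ String.ofList [Char.ofNat (65 + column_index - 26).toNat]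

-- ===== PRECONDITION & SPEC =====
-- A raises ValueError unless 1 ≤ day_of_month ≤ 31
def Pre_get_column_from_day (day_of_month : Int) : Prop :=
  1 ≤ day_of_month ∧ day_of_month ≤ 31
instance (day_of_month : Int) : Decidable (Pre_get_column_from_day day_of_month) := by
  unfold Pre_get_column_from_day; infer_instance
def pvWitness_get_column_from_day : Int := 5

def Spec_get_column_from_day (day_of_month : Int) (out : String) : Prop := out = get_column_from_day_alt day_of_month
instance (day_of_month : Int) (out : String) : Decidable (Spec_get_column_from_day day_of_month out) := by unfold Spec_get_column_from_day; infer_instance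

-- ===== CLAIM (what is proved, stated in full; the proofs are below) =====
def Claim_equal_get_column_from_day : Prop := ∀ (day_of_month : Int), Dom_get_column_from_day day_of_month → Pre_get_column_from_day day_of_month → Spec_get_column_from_day day_of_month (get_column_from_day day_of_month)

-- ===== LEMMAS AND PROOFS =====

theorem loop_one (i : Int) (acc : String) (h0 : 0 ≤ i) (h1 : i < 26) :
    indexToExcelColumnLoop i acc =
      String.ofList [Char.ofNat (i + 65).toNat] ++ acc := by
  have hd : PySem.Int.floordiv i 26 = 0 := by
    rw [PySem.Int.floordiv_eq_ediv_of_pos (by norm_num)]; omega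
  have hm : PySem.Int.mod i 26 = i := by
    rw [PySem.Int.mod_eq_emod_of_pos (by norm_num)]; omega
  rw [indexToExcelColumnLoop, dif_pos (by omega : i ≥ 0), hd, hm]
  norm_num
  rw [indexToExcelColumnLoop, dif_neg (by omega : ¬ ((-1 : Int) ≥ 0))]

theorem loop_two (i : Int) (acc : String) (h0 : 26 ≤ i) (h1 : i ≤ 51) :
    indexToExcelColumnLoop i acc =
      String.ofList ['A'] ++ (String.ofList [Char.ofNat (i - 26 + 65).toNat] ++ acc) := by
  have hd : PySem.Int.floordiv i 26 = 1 := by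
    rw [PySem.Int.floordiv_eq_ediv_of_pos (by norm_num)]; omega
  have hm : PySem.Int.mod i 26 = i - 26 := by
    rw [PySem.Int.mod_eq_emod_of_pos (by norm_num)]; omega
  rw [indexToExcelColumnLoop, dif_pos (by omega : i ≥ 0), hd, hm]
  norm_num
  rw [loop_one 0 _ (by norm_num) (by norm_num)]
  norm_num
  decide

-- ===== VERDICT (by name: the statement is the Claim_ definition above) =====
theorem get_column_from_day_spec : Claim_equal_get_column_from_day := by
  intro d _ hpre
  obtain ⟨h1, h2⟩ := hpre
  unfold Spec_get_column_from_day get_column_from_day get_column_from_day_alt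
    index_to_excel_column
  by_cases hc : (7 : Int) + (d - 1) < 26
  · rw [loop_one _ _ (by omega) hc, if_pos hc]
    have : (7 : Int) + (d - 1) + 65 = 65 + (7 + (d - 1)) := by ring
    rw [this]
    simp
  · rw [loop_two _ _ (by omega) (by omega), if_neg hc]
    have : (7 : Int) + (d - 1) - 26 + 65 = 65 + (7 + (d - 1)) - 26 := by ring
    rw [this]
    simp [String.ofList]
    decide
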